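-- pv_equiv track=rewrite | github.com/Uks130322/yandex_algs_6.0 | algs_6_3/task_G.py | pick_up_point
-- ===== SOURCE A (Python) =====
-- def pick_up_point(worktime: int, per_minute: int, clients: list[int]) -> int:
--     result = 0
--     minute = 0
--     rest = 0
--     for number in clients:
--         if minute <= worktime:
--             result += number + rest
--             rest = max(0, number + rest - per_minute)
--             minute += 1
--         else:
--             result += number + rest
--             rest = 0
--     result += rest
--     return result
-- ===== SOURCE B (Python) =====
-- def pick_up_point(worktime: int, per_minute: int, clients: list[int]) -> int:
--     # Identity: the carried rest after i served clients equals t_i - min(t_0..t_i),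
--     # where t_i is the prefix sum of (number - per_minute); the answer is
--     # sum(clients) plus the sum of those rests over the first max(0, worktime+1) clients.
--     split = max(0, worktime + 1)
--     t = 0
--     m = 0
--     extra = 0
--     for a in clients[:split]:
--         t += a - per_minute
--         m = min(m, t)
--         extra += t - m
--     return sum(clients) + extra
-- ===== Notes on version B (the rewrite author's own statement) =====
-- stated objective: alternative
-- what changed: B drops A's max-carry recurrence and minute counter: it uses the identity rest_i = t_i - min(t_0..t_i) over prefix sums t of (number - per_minute), summing those deviations over the first max(0, worktime+1) clients and adding sum(clients) once.
import Mathlib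
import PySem

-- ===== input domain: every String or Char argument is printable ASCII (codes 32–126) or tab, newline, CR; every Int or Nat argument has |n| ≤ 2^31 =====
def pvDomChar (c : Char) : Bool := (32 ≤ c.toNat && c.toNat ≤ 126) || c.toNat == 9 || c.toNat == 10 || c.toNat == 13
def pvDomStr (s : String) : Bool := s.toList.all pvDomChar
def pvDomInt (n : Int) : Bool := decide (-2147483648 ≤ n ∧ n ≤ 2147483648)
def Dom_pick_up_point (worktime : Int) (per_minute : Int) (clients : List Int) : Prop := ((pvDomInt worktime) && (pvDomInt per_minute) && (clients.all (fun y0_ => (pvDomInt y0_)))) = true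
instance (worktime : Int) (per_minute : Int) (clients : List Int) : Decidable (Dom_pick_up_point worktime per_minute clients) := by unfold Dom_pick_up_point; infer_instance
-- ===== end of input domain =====

-- B replaces A's max-carry recurrence by the prefix-sum/running-minimum identity
-- rest_i = t_i - min(t_0..t_i) (t = prefix sums of number - per_minute): alternative, same cost.

-- ===== PORT A =====
-- state = (result, minute, rest), exactly A's loop with its branch on minute <= worktime
def pick_up_point (worktime : Int) (per_minute : Int) (clients : List Int) : Int :=
  let s := clients.foldl
    (fun (st : Int × Int × Int) number =>
      if st.2.1 ≤ worktime then
        (st.1 + (number + st.2.2), st.2.1 + 1, max 0 (number + st.2.2 - per_minute))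
      else
        (st.1 + (number + st.2.2), st.2.1, 0))
    (0, 0, 0)
  s.1 + s.2.2

-- ===== PORT B =====
-- prefix sums t of (a - per_minute) with running minimum m over clients[:split];
-- answer = sum(clients) + Σ (t - m)
def pick_up_point_alt (worktime : Int) (per_minute : Int) (clients : List Int) : Int :=
  let split : Int := max 0 (worktime + 1)
  let s := (PySem.List.slice clients none (some split)).foldl
    (fun (st : Int × Int × Int) a =>
      let t := st.1 + a - per_minute
      let m := min st.2.1 t
      (t, m, st.2.2 + (t - m)))
    (0, 0, 0)
  clients.sum + s.2.2

-- ===== PRECONDITION & SPEC =====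
def Spec_pick_up_point (worktime : Int) (per_minute : Int) (clients : List Int) (out : Int) : Prop := out = pick_up_point_alt worktime per_minute clients
instance (worktime : Int) (per_minute : Int) (clients : List Int) (out : Int) : Decidable (Spec_pick_up_point worktime per_minute clients out) := by unfold Spec_pick_up_point; infer_instance

-- ===== CLAIM =====
def Claim_equal_pick_up_point : Prop := ∀ (worktime : Int) (per_minute : Int) (clients : List Int), Dom_pick_up_point worktime per_minute clients → Spec_pick_up_point worktime per_minute clients (pick_up_point worktime per_minute clients)

-- ===== LEMMAS AND PROOFS =====

-- invariant: A's fold from state (r, minute, rest) equals r + rest + (sum of remaining list)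
-- + the extra gathered by B's prefix-min fold over the next n = max(0, worktime+1-minute)
-- elements, provided the invariant rest = t - m holds for B's state (t, m, extra).
theorem pv_main (worktime per_minute : Int) : ∀ (l : List Int) (r minute rest t m extra : Int),
    rest = t - m → m ≤ t →
    (let s := l.foldl
      (fun (st : Int × Int × Int) number =>
        if st.2.1 ≤ worktime then
          (st.1 + (number + st.2.2), st.2.1 + 1, max 0 (number + st.2.2 - per_minute))
        else
          (st.1 + (number + st.2.2), st.2.1, 0))
      (r, minute, rest)
     s.1 + s.2.2)
    = r + rest + l.sum +
      (((l.take (max 0 (worktime + 1 - minute)).toNat).foldl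
        (fun (st : Int × Int × Int) a =>
          let t := st.1 + a - per_minute
          let m := min st.2.1 t
          (t, m, st.2.2 + (t - m)))
        (t, m, extra)).2.2 - extra) := by
  intro l
  induction l with
  | nil => intro r minute rest t m extra hinv hle; simp
  | cons x xs ih =>
    intro r minute rest t m extra hinv hle
    by_cases h : minute ≤ worktime
    · have hn : (max 0 (worktime + 1 - minute)).toNat
          = (max 0 (worktime + 1 - (minute + 1))).toNat + 1 := by omega
      simp only [List.foldl_cons, if_pos h, hn, List.take_succ_cons]
      have hinv' : max 0 (x + rest - per_minute) = (t + x - per_minute) - min m (t + x - per_minute) := by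
        omega
      rw [ih (r + (x + rest)) (minute + 1) (max 0 (x + rest - per_minute))
          (t + x - per_minute) (min m (t + x - per_minute))
          (extra + ((t + x - per_minute) - min m (t + x - per_minute))) hinv'
          (min_le_right _ _)]
      simp only [List.sum_cons]
      omega
    · have hn : (max 0 (worktime + 1 - minute)).toNat = 0 := by omega
      simp only [List.foldl_cons, if_neg h, hn, List.take_zero]
      rw [ih (r + (x + rest)) minute 0 0 0 extra (by omega) le_rfl]
      simp only [hn, List.take_zero, List.foldl_nil, List.sum_cons]
      omega

-- ===== VERDICT =====
theorem pick_up_point_spec : Claim_equal_pick_up_point := by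
  intro worktime per_minute clients _
  have hs : (0 : Int) ≤ max 0 (worktime + 1) := le_max_left _ _
  have key := pv_main worktime per_minute clients 0 0 0 0 0 0 (by omega) le_rfl
  have hm : (max 0 (worktime + 1 - 0)).toNat = (max 0 (worktime + 1)).toNat := by omega
  rw [hm] at key
  unfold Spec_pick_up_point
  simp only [pick_up_point, pick_up_point_alt, PySem.List.slice_to clients hs]
  simp only at key
  omega
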